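-- pv_equiv track=rewrite | github.com/BitorqubitT/aoc_2024 | day3-1.py | find_mul
-- ===== SOURCE A (Python) =====
-- def find_mul(line):
--     all_parts = []
--     for i in range(0, len(line) - 4):
--         if line[i:i+4] == 'mul(':
--             for j in range(0, len(line) - i):
--                 if line[i+j] == ")":
--                     found = i+j+1
--                     all_parts.append(line[i:found])
--                     break
--     return all_parts
-- ===== SOURCE B (Python) =====
-- def find_mul(line):
--     n = len(line)
--     # one backward pass: nxt[i] = index of the first ')' at or after i, else -1
--     nxt = []
--     k = -1
--     for i in range(n - 1, -1, -1):
--         if line[i] == ')':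
--             k = i
--         nxt.append(k)
--     nxt.reverse()
--     parts = []
--     for i in range(0, n - 4):
--         if line[i:i+4] == 'mul(' and nxt[i] != -1:
--             parts.append(line[i:nxt[i] + 1])
--     return parts
-- ===== Notes on version B (the rewrite author's own statement) =====
-- stated objective: alternative
-- what changed: Replaced A's restarted inner forward scan for the next closing parenthesis by a single backward pass that precomputes, for every position, the index of the first closing parenthesis at or after it, so the main scan does one table lookup per position.
import Mathlib
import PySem

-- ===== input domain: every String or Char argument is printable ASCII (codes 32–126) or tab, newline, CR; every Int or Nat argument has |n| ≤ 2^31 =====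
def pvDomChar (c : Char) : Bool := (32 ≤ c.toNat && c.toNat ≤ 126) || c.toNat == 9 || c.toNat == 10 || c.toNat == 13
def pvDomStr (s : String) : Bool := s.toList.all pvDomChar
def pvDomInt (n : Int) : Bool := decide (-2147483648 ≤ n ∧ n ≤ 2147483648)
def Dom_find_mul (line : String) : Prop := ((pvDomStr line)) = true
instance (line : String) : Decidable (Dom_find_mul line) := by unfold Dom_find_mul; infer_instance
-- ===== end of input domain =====

-- B replaces A's restarted inner scan for the next ')' by a single backward pass that
-- precomputes a next-')' table; proved to return the same list on every input.


-- ===== PORT A =====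
-- literal port of A: outer index loop; at each 'mul(' match an inner loop (ported as find?,
-- the loop-with-break) scans forward for the first ')'.
def find_mul (line : String) : List String :=
  let n : Int := PySem.Str.len line
  (PySem.List.pyRange 0 (n - 4) 1).foldl (fun all_parts i =>
    if PySem.Str.slice line (some i) (some (i + 4)) = "mul(" then
      match (PySem.List.pyRange 0 (n - i) 1).find?
          (fun j => PySem.Str.pyGet? line (i + j) == some ')') with
      | some j => all_parts ++ [PySem.Str.slice line (some i) (some (i + j + 1))]
      | none => all_parts
    else all_parts) []

-- ===== PORT B =====
-- literal port of Source B: backward pass builds the next-')' table, then one forward scan.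
-- nxt[i] is always in range in the second loop (0 ≤ i < n), so the pyGetD default is never read.
def find_mul_alt (line : String) : List String :=
  let n : Int := PySem.Str.len line
  let st := (PySem.List.pyRange (n - 1) (-1) (-1)).foldl
    (fun (s : Int × List Int) i =>
      let k : Int := if PySem.Str.pyGet? line i == some ')' then i else s.1
      (k, s.2 ++ [k])) (-1, [])
  let nxt := st.2.reverse
  (PySem.List.pyRange 0 (n - 4) 1).foldl (fun parts i =>
    if PySem.Str.slice line (some i) (some (i + 4)) = "mul("
        ∧ PySem.List.pyGetD nxt i (-1) ≠ -1 then
      parts ++ [PySem.Str.slice line (some i) (some (PySem.List.pyGetD nxt i (-1) + 1))]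
    else parts) []

-- ===== PRECONDITION & SPEC =====
def Spec_find_mul (line : String) (out : List String) : Prop := out = find_mul_alt line
instance (line : String) (out : List String) : Decidable (Spec_find_mul line out) := by unfold Spec_find_mul; infer_instance

-- ===== CLAIM (what is proved, stated in full; the proofs are below) =====
def Claim_equal_find_mul : Prop := ∀ (line : String), Dom_find_mul line → Spec_find_mul line (find_mul line)

-- ===== LEMMAS AND PROOFS =====

/-- First index `c >= i` with `l[c] = ')'`. -/
def fc (l : List Char) (i : Nat) : Option Nat :=
  if h : i < l.length then (if l[i] = ')' then some i else fc l (i + 1)) else none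
termination_by l.length - i

/-- `-1`-coded value of `fc` (Python's sentinel). -/
def kOf (o : Option Nat) : Int := o.elim (-1) (fun c => (c : Int))

lemma fc_of_lt (l : List Char) (i : Nat) (h : i < l.length) :
    fc l i = if l[i] = ')' then some i else fc l (i + 1) := by
  rw [fc]; simp [h]

lemma fc_of_ge (l : List Char) (i : Nat) (h : l.length <= i) : fc l i = none := by
  rw [fc]; simp [Nat.not_lt.mpr h]

/-- A's inner loop (`find?` over the remaining range, the loop-with-break) computes `fc`. -/
lemma innerA (line : String) (a j0 : Nat) :
    (PySem.List.pyRange (j0 : Int) ((line.toList.length : Int) - (a : Int)) 1).find?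
        (fun j => PySem.Str.pyGet? line ((a : Int) + j) == some ')')
      = (fc line.toList (a + j0)).map (fun c => ((c : Int) - (a : Int))) := by
  by_cases h : line.toList.length <= a + j0
  · rw [PySem.List.pyRange_one_eq_nil (by omega), fc_of_ge _ _ h]
    simp
  · push Not at h
    rw [PySem.List.pyRange_one_cons (by omega)]
    have hget : PySem.List.pyGet? line.toList ((a : Int) + (j0 : Int)) = some (line.toList[a + j0]'h) := by
      rw [show ((a : Int) + (j0 : Int)) = ((a + j0 : Nat) : Int) by push_cast; ring,
        PySem.List.pyGet?_natCast, List.getElem?_eq_getElem h]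
    by_cases hc : line.toList[a + j0]'h = ')'
    · rw [List.find?_cons_of_pos (by simp [hget, hc]), fc_of_lt _ _ h, if_pos hc]
      simp
    · rw [List.find?_cons_of_neg (by simp [hget, hc]), fc_of_lt _ _ h, if_neg hc,
        show ((j0 : Int) + 1) = ((j0 + 1 : Nat) : Int) by push_cast; ring,
        innerA line a (j0 + 1), show a + (j0 + 1) = a + j0 + 1 by ring]
termination_by line.toList.length - j0
decreasing_by omega

/-- B's backward pass produces (reversed) the table of `fc` values. -/
lemma backward_pass (line : String) (m : Nat) (hm : m <= line.toList.length) (acc : List Int) :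
    (PySem.List.pyRange ((m : Int) - 1) (-1) (-1)).foldl
      (fun (s : Int × List Int) i =>
        let k : Int := if PySem.Str.pyGet? line i == some ')' then i else s.1
        (k, s.2 ++ [k])) (kOf (fc line.toList m), acc)
    = (kOf (fc line.toList 0),
       acc ++ (List.range m).reverse.map (fun i => kOf (fc line.toList i))) := by
  induction m generalizing acc with
  | zero =>
    rw [PySem.List.pyRange_neg_one_eq_nil (by norm_num)]
    simp
  | succ m ih =>
    have hm' : m < line.toList.length := hm
    rw [show ((m + 1 : Nat) : Int) - 1 = ((m : Nat) : Int) by push_cast; ring,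
      PySem.List.pyRange_neg_one_cons (by omega)]
    simp only [List.foldl_cons]
    have hk : (if PySem.Str.pyGet? line ((m : Nat) : Int) == some ')' then ((m : Nat) : Int)
        else kOf (fc line.toList (m + 1))) = kOf (fc line.toList m) := by
      rw [PySem.Str.pyGet?_natCast, List.getElem?_eq_getElem hm', fc_of_lt _ _ hm']
      by_cases hc : line.toList[m] = ')'
      · simp [hc, kOf]
      · simp [hc]
    rw [hk, ih (by omega) (acc ++ [kOf (fc line.toList m)])]
    simp [List.range_succ]

-- ===== VERDICT (by name: the statement is the Claim_ definition above) =====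
theorem find_mul_spec : Claim_equal_find_mul := by
  intro line _
  unfold Spec_find_mul find_mul find_mul_alt
  simp only [PySem.Str.len_eq]
  have h0 : kOf (fc line.toList line.toList.length) = -1 := by
    rw [fc_of_ge _ _ le_rfl]; rfl
  rw [show ((-1 : Int), ([] : List Int)) = (kOf (fc line.toList line.toList.length), ([] : List Int)) by rw [h0]]
  rw [backward_pass line line.toList.length le_rfl []]
  simp only [List.nil_append, List.reverse_reverse, List.map_reverse]
  apply PySem.List.foldl_congr_mem
  intro acc i hi
  rw [PySem.List.mem_pyRange_one] at hi
  lift i to Nat using hi.1 with a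
  have ha : a < line.toList.length := by omega
  have hnxt : PySem.List.pyGetD
      (List.map (fun i => kOf (fc line.toList i)) (List.range line.toList.length)) (a : Int) (-1)
      = kOf (fc line.toList a) := by
    rw [PySem.List.pyGetD_natCast, PySem.List.getD_map_range _ _ _ _ ha]
  have hfind := innerA line a 0
  simp only [Nat.cast_zero, Nat.add_zero] at hfind
  rw [hfind, hnxt]
  cases hfc : fc line.toList a with
  | none =>
    simp [kOf]
  | some c =>
    have hc' : ((c : Int)) ≠ -1 := by omega
    simp only [kOf, Option.elim, Option.map_some, Option.bind_some, Option.pure_def,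
      Option.bind_eq_bind]
    by_cases hmu : PySem.Str.slice line (some (a : Int)) (some ((a : Int) + 4)) = "mul("
    · rw [if_pos hmu, if_pos ⟨hmu, hc'⟩,
        show (a : Int) + ((c : Int) - (a : Int)) + 1 = (c : Int) + 1 by ring]
    · rw [if_neg hmu, if_neg (by tauto)]
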